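-- pv_equiv track=rewrite | github.com/nilaa123/python_practise | local/accenture_praac/LargeSmallSum.py | LargeSmallsum
-- ===== SOURCE A (Python) =====
-- def LargeSmallsum(arr):
--     even=[]
--     odd=[]
--     if(len(arr))<=3:
--         return 0
--     for i in range(len(arr)):
--         if(arr[i]%2==0):
--             even.append(arr[i])
--         else:
--             odd.append(arr[i])
--     even.sort()
--     odd.sort()
--     sum=even[1]+odd[1]
--     return sum
-- ===== SOURCE B (Python) =====
-- def LargeSmallsum(arr):
--     if len(arr) <= 3:
--         return 0
--     e1 = e2 = o1 = o2 = None
--     for x in arr: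
--         if x % 2 == 0:
--             if e1 is None or x < e1:
--                 e1, e2 = x, e1
--             elif e2 is None or x < e2:
--                 e2 = x
--         else:
--             if o1 is None or x < o1:
--                 o1, o2 = x, o1
--             elif o2 is None or x < o2:
--                 o2 = x
--     return e2 + o2
-- ===== Notes on version B (the rewrite author's own statement) =====
-- stated objective: faster
-- what changed: Replaced partition-then-sort-both-lists with a single pass that tracks the two smallest even and two smallest odd values in four scalars.
import Mathlib
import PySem

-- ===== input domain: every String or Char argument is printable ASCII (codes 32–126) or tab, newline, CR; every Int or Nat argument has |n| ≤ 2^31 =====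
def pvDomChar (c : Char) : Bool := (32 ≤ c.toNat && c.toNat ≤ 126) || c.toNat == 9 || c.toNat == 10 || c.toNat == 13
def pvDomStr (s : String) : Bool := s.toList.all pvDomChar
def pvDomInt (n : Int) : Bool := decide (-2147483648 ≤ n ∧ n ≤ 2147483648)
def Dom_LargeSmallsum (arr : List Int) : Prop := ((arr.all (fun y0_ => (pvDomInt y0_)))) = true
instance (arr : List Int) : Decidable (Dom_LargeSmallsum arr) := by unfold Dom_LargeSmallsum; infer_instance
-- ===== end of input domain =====

-- B replaces partition + two sorts by a single pass tracking the two smallest values of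
-- each parity. Equivalence is claimed on every input where A returns (Pre_ excludes
-- exactly the inputs where A's indexing of a sorted parity list raises IndexError).

-- ===== PORT A =====
-- shared parity test: arr[i] % 2 == 0 (Python %)
def pvEven (x : Int) : Bool := PySem.Int.mod x 2 == 0

-- 'for i in range(len(arr)): … arr[i] …' visits every element in order; ported as a fold
-- over the elements themselves (exact: i covers all indices). Indexing the second element
-- of each sorted list is ported with pyGetD, exact under Pre_ (index in range); outside
-- Pre_ Python raises IndexError.
def LargeSmallsum (arr : List Int) : Int :=
  if arr.length ≤ 3 then 0
  else
    let p := arr.foldl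
      (fun (p : List Int × List Int) x =>
        if pvEven x then (p.1 ++ [x], p.2) else (p.1, p.2 ++ [x])) ([], [])
    let evenS := PySem.List.sorted p.1 (fun x => x) false
    let oddS := PySem.List.sorted p.2 (fun x => x) false
    PySem.List.pyGetD evenS 1 0 + PySem.List.pyGetD oddS 1 0

-- ===== PORT B =====
-- one update of a "two smallest so far" pair (e1, e2), mirroring Source B's branch chain;
-- 'is None' on e1/e2 becomes the Option pattern match.
def pvIns2 (p : Option Int × Option Int) (x : Int) : Option Int × Option Int :=
  match p.1 with
  | none => (some x, p.1)
  | some a =>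
    if x < a then (some x, some a)
    else
      match p.2 with
      | none => (some a, some x)
      | some b => if x < b then (some a, some x) else (some a, some b)

-- single pass over arr; final 'e2 + o2' (raises TypeError outside Pre_, where a slot is
-- still None) is ported with getD 0, exact under Pre_.
def LargeSmallsum_alt (arr : List Int) : Int :=
  if arr.length ≤ 3 then 0
  else
    let s := arr.foldl
      (fun (s : (Option Int × Option Int) × (Option Int × Option Int)) x =>
        if pvEven x then (pvIns2 s.1 x, s.2) else (s.1, pvIns2 s.2 x))
      ((none, none), (none, none))
    s.1.2.getD 0 + s.2.2.getD 0

-- ===== PRECONDITION & SPEC =====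
-- Pre_ excludes exactly the inputs on which A raises: more than three elements but fewer
-- than two even or fewer than two odd ones (A's indexing is an IndexError there; B's final
-- addition is a TypeError on the same inputs).
def Pre_LargeSmallsum (arr : List Int) : Prop :=
  3 < arr.length →
    2 ≤ (arr.filter pvEven).length ∧ 2 ≤ (arr.filter (fun x => ¬ pvEven x)).length
instance (arr : List Int) : Decidable (Pre_LargeSmallsum arr) := by
  unfold Pre_LargeSmallsum; infer_instance

def pvWitness_LargeSmallsum : List Int := [4, 7, 2, 9, 1]

def Spec_LargeSmallsum (arr : List Int) (out : Int) : Prop := out = LargeSmallsum_alt arr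
instance (arr : List Int) (out : Int) : Decidable (Spec_LargeSmallsum arr out) := by unfold Spec_LargeSmallsum; infer_instance

-- ===== CLAIM (what is proved, stated in full; the proofs are below) =====
def Claim_equal_LargeSmallsum : Prop := ∀ (arr : List Int), Dom_LargeSmallsum arr → Pre_LargeSmallsum arr → Spec_LargeSmallsum arr (LargeSmallsum arr)

-- ===== LEMMAS AND PROOFS =====

-- the first two elements of a list, as Source B's state pair
def pvFirstTwo (l : List Int) : Option Int × Option Int :=
  match l with
  | [] => (none, none)
  | [a] => (some a, none)
  | a :: b :: _ => (some a, some b)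

-- insertion-sort fold used as the proof's reference sorted order
def pvISort (l : List Int) : List Int :=
  l.foldl (fun acc x => List.orderedInsert (· ≤ ·) x acc) []

lemma pvISort_perm (l : List Int) : (pvISort l).Perm l := by
  suffices h : ∀ (l acc : List Int),
      (l.foldl (fun acc x => List.orderedInsert (· ≤ ·) x acc) acc).Perm (acc ++ l) by
    simpa [pvISort] using h l []
  intro l
  induction l with
  | nil => intro acc; simp
  | cons x t ih =>
    intro acc
    simp only [List.foldl_cons]
    refine (ih _).trans ?_
    refine (List.Perm.append_right t (List.perm_orderedInsert _ _ _)).trans ?_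
    simpa using List.perm_middle.symm

lemma pvISort_pairwise (l : List Int) : (pvISort l).Pairwise (· ≤ ·) := by
  suffices h : ∀ (l acc : List Int), acc.Pairwise (· ≤ ·) →
      (l.foldl (fun acc x => List.orderedInsert (· ≤ ·) x acc) acc).Pairwise (· ≤ ·) by
    exact h l [] List.Pairwise.nil
  intro l
  induction l with
  | nil => intro acc h; simpa using h
  | cons x t ih =>
    intro acc h
    simp only [List.foldl_cons]
    exact ih _ (List.Pairwise.orderedInsert x acc h)

lemma pySorted_eq_pvISort (l : List Int) :
    PySem.List.sorted l (fun x => x) false = pvISort l :=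
  PySem.List.sorted_id_eq_of_perm_of_pairwise _ _ (pvISort_perm l) (pvISort_pairwise l)

-- one Source B update step agrees with inserting into the sorted list and taking its first two
lemma pvIns2_firstTwo (s : List Int) (hs : s.Pairwise (· ≤ ·)) (x : Int) :
    pvIns2 (pvFirstTwo s) x = pvFirstTwo (List.orderedInsert (· ≤ ·) x s) := by
  match s with
  | [] => simp [pvIns2, pvFirstTwo, List.orderedInsert]
  | [a] =>
    simp only [pvFirstTwo, pvIns2, List.orderedInsert]
    by_cases h1 : x ≤ a
    · by_cases h2 : x < a
      · simp [h1, h2]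
      · have : x = a := le_antisymm h1 (by omega)
        subst this
        simp
    · simp [h1, show ¬x < a by omega]
  | a :: b :: t =>
    have hab : a ≤ b := (List.pairwise_cons.mp hs).1 b (by simp)
    simp only [pvFirstTwo, pvIns2, List.orderedInsert]
    by_cases h1 : x ≤ a
    · by_cases h2 : x < a
      · simp [h1, h2]
      · have : x = a := le_antisymm h1 (by omega)
        subst this
        by_cases h3 : x < b <;> simp [h3]
        omega
    · by_cases h3 : x ≤ b
      · by_cases h4 : x < b
        · simp [h1, show ¬x < a by omega, h3]
          omega
        · have : x = b := le_antisymm h3 (by omega)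
          subst this
          simp [h1, show ¬x < a by omega, h3]
      · simp [h1, show ¬x < a by omega, h3, show ¬x < b by omega]

-- the whole fold computes the first two elements of the insertion sort
lemma pvFold_eq_firstTwo_pvISort (l : List Int) :
    l.foldl pvIns2 (none, none) = pvFirstTwo (pvISort l) := by
  suffices h : ∀ (l acc : List Int), acc.Pairwise (· ≤ ·) →
      l.foldl pvIns2 (pvFirstTwo acc) =
        pvFirstTwo (l.foldl (fun acc x => List.orderedInsert (· ≤ ·) x acc) acc) by
    have := h l [] List.Pairwise.nil
    simpa [pvFirstTwo, pvISort] using this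
  intro l
  induction l with
  | nil => intro acc _; rfl
  | cons x t ih =>
    intro acc h
    simp only [List.foldl_cons]
    rw [pvIns2_firstTwo acc h x]
    exact ih _ (List.Pairwise.orderedInsert x acc h)

-- second element of the Python-sorted list = second component of Source B's pair
lemma pvSecond_eq (l : List Int) (hl : 2 ≤ l.length) :
    PySem.List.pyGetD (PySem.List.sorted l (fun x => x) false) 1 0 =
      (l.foldl pvIns2 (none, none)).2.getD 0 := by
  rw [pySorted_eq_pvISort, pvFold_eq_firstTwo_pvISort]
  have hlen : (pvISort l).length = l.length := (pvISort_perm l).length_eq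
  match hs : pvISort l with
  | [] => rw [hs] at hlen; simp at hlen; omega
  | [a] => rw [hs] at hlen; simp at hlen; omega
  | a :: b :: t => simp [pvFirstTwo, PySem.List.pyGetD]

-- A's single pair-accumulator loop is the pair of filters
lemma pvPairFoldA (arr : List Int) (p : List Int × List Int) :
    arr.foldl
      (fun (p : List Int × List Int) x =>
        if pvEven x then (p.1 ++ [x], p.2) else (p.1, p.2 ++ [x])) p =
      (p.1 ++ arr.filter pvEven, p.2 ++ arr.filter (fun x => !pvEven x)) := by
  induction arr generalizing p with
  | nil => simp
  | cons x t ih =>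
    by_cases h : pvEven x <;> simp [h, ih]

-- B's single loop over a pair of state pairs is the pair of filtered folds
lemma pvPairFoldB (arr : List Int) (s : (Option Int × Option Int) × (Option Int × Option Int)) :
    arr.foldl
      (fun (s : (Option Int × Option Int) × (Option Int × Option Int)) x =>
        if pvEven x then (pvIns2 s.1 x, s.2) else (s.1, pvIns2 s.2 x)) s =
      ((arr.filter pvEven).foldl pvIns2 s.1,
       (arr.filter (fun x => !pvEven x)).foldl pvIns2 s.2) := by
  induction arr generalizing s with
  | nil => simp
  | cons x t ih =>
    by_cases h : pvEven x <;> simp [h, ih]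

-- ===== VERDICT (by name: the statement is the Claim_ definition above) =====
theorem LargeSmallsum_spec : Claim_equal_LargeSmallsum := by
  intro arr _ hpre
  unfold Spec_LargeSmallsum LargeSmallsum LargeSmallsum_alt
  by_cases hlen : arr.length ≤ 3
  · simp [hlen]
  · simp only [hlen, if_false]
    obtain ⟨he, ho⟩ := hpre (by omega)
    rw [pvPairFoldA, pvPairFoldB]
    simp only [List.nil_append]
    rw [pvSecond_eq _ he, pvSecond_eq _ (by simpa using ho)]
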